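-- pv_equiv track=rewrite | github.com/Kuborgc6/Advent2023 | day7.py | find_winnings
-- ===== SOURCE A (Python) =====
-- from operator import itemgetter
--
-- def find_winnings(players):
--     result = 0
--     temp_strength = 1
--     ranges = list()
--     ranges.append(0)
--     for i in range(len(players)):
--         if players[i][2] > temp_strength:
--             temp_strength = players[i][2]
--             ranges.append(i)
--     ranges.append(len(players))
--     for i in range(len(ranges)-1):
--         players[ranges[i]:ranges[i+1]] = sorted(players[ranges[i]:ranges[i+1]], key=itemgetter(3))
--
--     for i in range(len(players)):
--         result += (i + 1) * players[i][1]
--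
--     return result
-- ===== SOURCE B (Python) =====
-- def find_winnings(players):
--     # One pass assigns each player a group id (new group whenever strength exceeds
--     # the running max), then ONE stable sort keyed on (group id, players[i][3])
--     # replaces A's per-group slice sorting; players is mutated in place like A.
--     annotated = []
--     gid = 0
--     running_max = 1
--     for p in players:
--         if p[2] > running_max:
--             gid += 1
--             running_max = p[2]
--         annotated.append((gid, p))
--     ordered = sorted(annotated, key=lambda t: (t[0], t[1][3]))
--     players[:] = [p for _, p in ordered]
--     result = 0
--     for rank, p in enumerate(players, 1):
--         result += rank * p[1]
--     return result
-- ===== Notes on version B (the rewrite author's own statement) =====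
-- stated objective: alternative
-- what changed: A finds group boundary indices and stably sorts each players[a:b] slice in place by field 3; B instead annotates each player with a group id in one pass and performs a single stable sort keyed on (group id, field 3), writing the result back at once.
import Mathlib
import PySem

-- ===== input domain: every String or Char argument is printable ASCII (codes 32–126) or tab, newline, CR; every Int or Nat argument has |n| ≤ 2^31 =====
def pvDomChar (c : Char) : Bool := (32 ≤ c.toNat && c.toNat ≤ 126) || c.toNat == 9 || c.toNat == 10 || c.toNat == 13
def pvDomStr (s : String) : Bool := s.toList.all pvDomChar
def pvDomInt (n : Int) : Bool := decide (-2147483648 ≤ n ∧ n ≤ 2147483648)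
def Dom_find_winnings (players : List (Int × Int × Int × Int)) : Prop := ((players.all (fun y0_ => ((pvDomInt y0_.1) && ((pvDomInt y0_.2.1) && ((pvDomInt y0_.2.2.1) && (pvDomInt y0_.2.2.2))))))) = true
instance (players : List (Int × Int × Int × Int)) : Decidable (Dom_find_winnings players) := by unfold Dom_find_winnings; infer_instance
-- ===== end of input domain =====

-- B replaces A's per-group slice sorting by a one-pass group-id annotation plus one
-- stable sort on (group id, fourth field); same return value (and same final content
-- of the argument list, which both Pythons mutate in place).

-- ===== PORT A =====
-- literal port of A: first loop collects boundary indices into `ranges`,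
-- second loop slice-sorts each [ranges[i], ranges[i+1]) segment
-- (`players[a:b] = L` is ported as players[:a] ++ L ++ players[b:], exact here),
-- third loop accumulates (i+1)*players[i][1].
def find_winnings (players : List (Int × Int × Int × Int)) : Int :=
  let st := (PySem.List.pyRange 0 (PySem.List.len players) 1).foldl
      (fun (s : Int × List Int) i =>
        let p := PySem.List.pyGetD players i (0, 0, 0, 0)
        if p.2.2.1 > s.1 then (p.2.2.1, s.2 ++ [i]) else s)
      ((1 : Int), ([0] : List Int))
  let ranges : List Int := st.2 ++ [PySem.List.len players]
  let players2 := (PySem.List.pyRange 0 ((ranges.length : Int) - 1) 1).foldl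
      (fun ps i =>
        let a := PySem.List.pyGetD ranges i 0
        let b := PySem.List.pyGetD ranges (i + 1) 0
        PySem.List.slice ps none (some a)
          ++ PySem.List.sorted (PySem.List.slice ps (some a) (some b)) (fun p => p.2.2.2) false
          ++ PySem.List.slice ps (some b) none)
      players
  (PySem.List.enumerate players2 1).foldl (fun r ip => r + ip.1 * ip.2.2.1) 0

-- ===== PORT B =====
-- literal port of Source B: one fold builds (gid, player) annotations, one sorted2 on
-- (gid, player[3]), project the players back out, then the enumerate sum.
def find_winnings_alt (players : List (Int × Int × Int × Int)) : Int :=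
  let st := players.foldl
      (fun (s : Int × Int × List (Int × (Int × Int × Int × Int))) p =>
        let gid := if p.2.2.1 > s.2.1 then s.1 + 1 else s.1
        let rm := if p.2.2.1 > s.2.1 then p.2.2.1 else s.2.1
        (gid, rm, s.2.2 ++ [(gid, p)]))
      ((0 : Int), (1 : Int), ([] : List (Int × (Int × Int × Int × Int))))
  let ordered := PySem.List.sorted2 st.2.2 (fun t => t.1) (fun t => t.2.2.2.2) false
  let ps := ordered.map (fun t => t.2)
  (PySem.List.enumerate ps 1).foldl (fun r ip => r + ip.1 * ip.2.2.1) 0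

-- ===== PRECONDITION & SPEC =====
def Spec_find_winnings (players : List (Int × Int × Int × Int)) (out : Int) : Prop := out = find_winnings_alt players
instance (players : List (Int × Int × Int × Int)) (out : Int) : Decidable (Spec_find_winnings players out) := by unfold Spec_find_winnings; infer_instance

-- ===== CLAIM (what is proved, stated in full; the proofs are below) =====
def Claim_equal_find_winnings : Prop := ∀ (players : List (Int × Int × Int × Int)), Dom_find_winnings players → Spec_find_winnings players (find_winnings players)

-- ===== LEMMAS AND PROOFS =====

-- abbreviations for the proof (the player type and the sort key)
abbrev PV : Type := Int × Int × Int × Int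

-- the groups A's boundary indices delimit: a new group starts whenever the
-- third field exceeds the running max (seeded 1); `cur` is the open group
def grpRec (m : Int) (cur : List PV) : List PV → List (List PV)
  | [] => [cur]
  | p :: t => if p.2.2.1 > m then cur :: grpRec p.2.2.1 [p] t else grpRec m (cur ++ [p]) t

-- boundary indices A's first loop appends, starting at position s
def bnd (m s : Int) : List PV → List Int
  | [] => []
  | p :: t => if p.2.2.1 > m then s :: bnd p.2.2.1 (s + 1) t else bnd m (s + 1) t

-- the running max itself
def fm (m : Int) : List PV → Int
  | [] => m
  | p :: t => if p.2.2.1 > m then fm p.2.2.1 t else fm m t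

-- B's annotation, structurally
def annotate (g m : Int) : List PV → List (Int × PV)
  | [] => []
  | p :: t => if p.2.2.1 > m then (g + 1, p) :: annotate (g + 1) p.2.2.1 t
              else (g, p) :: annotate g m t

-- B's final gid
def gF (g m : Int) : List PV → Int
  | [] => g
  | p :: t => if p.2.2.1 > m then gF (g + 1) p.2.2.1 t else gF g m t

-- tag each group with consecutive ids
def tag (g : Int) : List (List PV) → List (Int × PV)
  | [] => []
  | h :: t => h.map (fun p => (g, p)) ++ tag (g + 1) t

-- generic stable insertion sort as the PySem fold
def sortBy {α : Type} (before : α → α → Bool) (xs : List α) : List α :=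
  xs.foldl (fun acc x => PySem.List.insertBy before x acc) []

def sortedGrp (players : List PV) : List PV :=
  ((grpRec 1 [] players).map (fun h => PySem.List.sorted h (fun p => p.2.2.2) false)).flatten

theorem ins_append_left {α : Type} (before : α → α → Bool) (x : α) (l1 l2 : List α)
    (h : ∀ y ∈ l1, before x y = false) :
    PySem.List.insertBy before x (l1 ++ l2) = l1 ++ PySem.List.insertBy before x l2 := by
  induction l1 with
  | nil => simp
  | cons y t ih =>
      simp only [List.cons_append, PySem.List.insertBy, h y (by simp)]
      simp only [Bool.false_eq_true, if_false, List.cons.injEq, true_and]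
      exact ih (fun z hz => h z (by simp [hz]))

theorem foldl_ins_append {α : Type} (before : α → α → Bool) (l2 S acc0 : List α)
    (h : ∀ x ∈ l2, ∀ y ∈ S, before x y = false) :
    l2.foldl (fun acc x => PySem.List.insertBy before x acc) (S ++ acc0)
      = S ++ l2.foldl (fun acc x => PySem.List.insertBy before x acc) acc0 := by
  induction l2 generalizing acc0 with
  | nil => simp
  | cons x t ih =>
      simp only [List.foldl_cons]
      rw [ins_append_left before x S acc0 (fun y hy => h x (by simp) y hy)]
      exact ih _ (fun z hz => h z (by simp [hz]))

theorem mem_sortBy {α : Type} (before : α → α → Bool) (xs : List α) (x : α) :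
    x ∈ sortBy before xs ↔ x ∈ xs := by
  have key : ∀ (l acc : List α), x ∈ l.foldl (fun acc x => PySem.List.insertBy before x acc) acc ↔ x ∈ l ∨ x ∈ acc := by
    intro l
    induction l with
    | nil => simp
    | cons y t ih =>
        intro acc
        simp only [List.foldl_cons, ih, PySem.List.mem_insertBy, List.mem_cons]
        tauto
  simpa using key xs []

theorem sortBy_append_sep {α : Type} (before : α → α → Bool) (l1 l2 : List α)
    (h : ∀ x ∈ l2, ∀ y ∈ l1, before x y = false) :
    sortBy before (l1 ++ l2) = sortBy before l1 ++ sortBy before l2 := by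
  unfold sortBy
  rw [List.foldl_append]
  have := foldl_ins_append before l2 (sortBy before l1) []
    (fun x hx y hy => h x hx y ((mem_sortBy before l1 y).mp hy))
  simpa [sortBy] using this

theorem insertBy_map {α β : Type} (before : α → α → Bool) (before' : β → β → Bool)
    (f : α → β) (hf : ∀ a b, before' (f a) (f b) = before a b) (x : α) (l : List α) :
    PySem.List.insertBy before' (f x) (l.map f) = (PySem.List.insertBy before x l).map f := by
  induction l with
  | nil => simp [PySem.List.insertBy]
  | cons y t ih =>
      simp only [List.map_cons, PySem.List.insertBy, hf x y]
      by_cases hb : before x y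
      · simp [hb]
      · simp [hb, ih]

theorem sortBy_map {α β : Type} (before : α → α → Bool) (before' : β → β → Bool)
    (f : α → β) (hf : ∀ a b, before' (f a) (f b) = before a b) (l : List α) :
    sortBy before' (l.map f) = (sortBy before l).map f := by
  have key : ∀ (l acc : List α),
      (l.map f).foldl (fun a x => PySem.List.insertBy before' x a) (acc.map f)
        = (l.foldl (fun a x => PySem.List.insertBy before x a) acc).map f := by
    intro l
    induction l with
    | nil => simp
    | cons y t ih =>
        intro acc
        simp only [List.map_cons, List.foldl_cons]
        rw [insertBy_map before before' f hf y acc]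
        exact ih _
  simpa [sortBy] using key l []

-- A's first loop computes (running max, acc ++ boundary indices)
theorem loopA_eq (xs : List PV) : ∀ (m : Int) (acc : List Int) (s : Int),
    (PySem.List.enumerate xs s).foldl
      (fun (st : Int × List Int) ip =>
        if ip.2.2.2.1 > st.1 then (ip.2.2.2.1, st.2 ++ [ip.1]) else st) (m, acc)
      = (fm m xs, acc ++ bnd m s xs) := by
  intro m acc s
  induction xs generalizing m acc s with
  | nil => simp [PySem.List.enumerate_nil, fm, bnd]
  | cons p t ih =>
      rw [PySem.List.enumerate_cons]
      simp only [List.foldl_cons, fm, bnd]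
      by_cases hp : p.2.2.1 > m
      · simp only [hp, if_pos]
        rw [ih]
        simp
      · simp only [hp, if_false]
        rw [ih]

-- boundaries + endpoints are the scanl of the group lengths
theorem scanl_grp (xs : List PV) : ∀ (m : Int) (cur : List PV) (s : Int),
    List.scanl (· + ·) (s - (cur.length : Int))
        ((grpRec m cur xs).map (fun g => (g.length : Int)))
      = (s - (cur.length : Int)) :: (bnd m s xs ++ [s + xs.length]) := by
  intro m cur s
  induction xs generalizing m cur s with
  | nil => simp [grpRec, bnd, List.scanl]
  | cons p t ih =>
      simp only [grpRec, bnd]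
      by_cases hp : p.2.2.1 > m
      · simp only [hp, if_pos, List.map_cons, List.scanl_cons]
        have h1 : s - (cur.length : Int) + (cur.length : Int) = (s + 1) - (([p] : List PV).length : Int) := by
          simp
        rw [h1, ih p.2.2.1 [p] (s + 1)]
        have h2 : (s + 1) - (([p] : List PV).length : Int) = s := by simp
        have h3 : s + 1 + ((t.length : Nat) : Int) = s + ((p :: t).length : Int) := by
          simp; omega
        rw [h2, h3]
        simp
      · simp only [hp, if_false]
        have h1 : s - (cur.length : Int) = (s + 1) - (((cur ++ [p]).length : Nat) : Int) := by
          simp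
        have h3 : s + 1 + ((t.length : Nat) : Int) = s + ((p :: t).length : Int) := by
          simp; omega
        rw [h1, ih m (cur ++ [p]) (s + 1), h3, ← h1]

-- the indexed second loop, rephrased over adjacent boundary pairs
theorem pairs_map (R : List Int) :
    (PySem.List.pyRange 0 ((R.length : Int) - 1) 1).map
        (fun i => (PySem.List.pyGetD R i 0, PySem.List.pyGetD R (i + 1) 0))
      = R.zip R.tail := by
  apply List.ext_getElem
  · simp only [List.length_map, PySem.List.length_pyRange_one, List.length_zip, List.length_tail]
    omega
  · intro j h1 h2
    simp only [List.getElem_map, PySem.List.getElem_pyRange_one, List.getElem_zip]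
    have hlen : j + 1 < R.length := by
      simp [PySem.List.length_pyRange_one] at h1
      omega
    have hj : j < R.length := by omega
    have e1 : PySem.List.pyGetD R ((0 : Int) + (j : Int)) 0 = R[j] := by
      rw [show ((0 : Int) + (j : Int)) = ((j : Nat) : Int) by omega]
      rw [PySem.List.pyGetD_natCast]
      simp [List.getD_eq_getElem?_getD, hj]
    have e2 : PySem.List.pyGetD R ((0 : Int) + (j : Int) + 1) 0 = R[j + 1] := by
      rw [show ((0 : Int) + (j : Int) + 1) = (((j + 1 : Nat)) : Int) by push_cast; ring_nf]
      rw [PySem.List.pyGetD_natCast]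
      simp [List.getD_eq_getElem?_getD, hlen]
    rw [e1, e2]
    congr 1
    rw [List.getElem_tail]

theorem scanl_head {α : Type} (f : α → α → α) (b : α) (l : List α) :
    ∃ tl, List.scanl f b l = b :: tl := by
  cases l with
  | nil => exact ⟨[], rfl⟩
  | cons a l => exact ⟨_, List.scanl_cons ..⟩

theorem grpRec_flatten (xs : List PV) : ∀ (m : Int) (cur : List PV),
    (grpRec m cur xs).flatten = cur ++ xs := by
  induction xs with
  | nil => intro m cur; simp [grpRec]
  | cons p t ih =>
      intro m cur
      simp only [grpRec]
      by_cases hp : p.2.2.1 > m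
      · simp [hp, ih]
      · simp [hp, ih]

-- one slice-sort step over a prefix sum boundary pair
theorem slice_fold (gs : List (List PV)) : ∀ (done : List PV),
    (((List.scanl (· + ·) ((done.length : Int)) (gs.map (fun g => (g.length : Int)))).zip
        (List.scanl (· + ·) ((done.length : Int)) (gs.map (fun g => (g.length : Int)))).tail).foldl
      (fun ps ab =>
        PySem.List.slice ps none (some ab.1)
          ++ PySem.List.sorted (PySem.List.slice ps (some ab.1) (some ab.2)) (fun p => p.2.2.2) false
          ++ PySem.List.slice ps (some ab.2) none)
      (done ++ gs.flatten))
      = done ++ (gs.map (fun h => PySem.List.sorted h (fun p => p.2.2.2) false)).flatten := by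
  induction gs with
  | nil => intro done; simp [List.scanl]
  | cons g t ih =>
      intro done
      simp only [List.map_cons, List.scanl_cons]
      obtain ⟨tl, htl⟩ := scanl_head (· + ·) ((done.length : Int) + (g.length : Int)) (t.map (fun g => (g.length : Int)))
      rw [htl]
      simp only [List.zip_cons_cons, List.tail_cons, List.foldl_cons, List.flatten_cons]
      have e1 : PySem.List.slice (done ++ (g ++ t.flatten)) none (some ((done.length : Int))) = done := by
        rw [PySem.List.slice_to_natCast]
        exact List.take_left ..
      have e2 : PySem.List.slice (done ++ (g ++ t.flatten)) (some ((done.length : Int))) (some ((done.length : Int) + (g.length : Int))) = g := by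
        rw [PySem.List.slice_natCast_add]
        rw [List.drop_left]
        exact List.take_left ..
      have e3 : PySem.List.slice (done ++ (g ++ t.flatten)) (some ((done.length : Int) + (g.length : Int))) none = t.flatten := by
        rw [show (done.length : Int) + (g.length : Int) = ((done.length + g.length : Nat) : Int) by push_cast; ring]
        rw [PySem.List.slice_from_natCast]
        rw [show done ++ (g ++ t.flatten) = (done ++ g) ++ t.flatten by simp]
        rw [show done.length + g.length = (done ++ g).length by simp]
        exact List.drop_left ..
      rw [e1, e2, e3]
      have hlen : ((done ++ PySem.List.sorted g (fun p => p.2.2.2) false).length : Int)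
          = (done.length : Int) + (g.length : Int) := by
        simp [PySem.List.length_sorted]
      have := ih (done ++ PySem.List.sorted g (fun p => p.2.2.2) false)
      rw [hlen, htl] at this
      simpa [List.append_assoc] using this

-- B's annotation loop computes (final gid, running max, acc ++ annotate)
theorem loopB_eq (xs : List PV) : ∀ (g m : Int) (acc : List (Int × PV)),
    xs.foldl
      (fun (s : Int × Int × List (Int × PV)) p =>
        let gid := if p.2.2.1 > s.2.1 then s.1 + 1 else s.1
        let rm := if p.2.2.1 > s.2.1 then p.2.2.1 else s.2.1
        (gid, rm, s.2.2 ++ [(gid, p)])) (g, m, acc)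
      = (gF g m xs, fm m xs, acc ++ annotate g m xs) := by
  intro g m acc
  induction xs generalizing g m acc with
  | nil => simp [gF, fm, annotate]
  | cons p t ih =>
      simp only [List.foldl_cons, gF, fm, annotate]
      by_cases hp : p.2.2.1 > m
      · simp only [hp, if_pos]
        rw [ih]
        simp
      · simp only [hp, if_false]
        rw [ih]
        simp

theorem annotate_tag (xs : List PV) : ∀ (m : Int) (cur : List PV) (g : Int),
    cur.map (fun p => (g, p)) ++ annotate g m xs = tag g (grpRec m cur xs) := by
  intro m cur g
  induction xs generalizing m cur g with
  | nil => simp [annotate, grpRec, tag]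
  | cons p t ih =>
      simp only [annotate, grpRec]
      by_cases hp : p.2.2.1 > m
      · simp only [hp, if_pos, tag]
        have := ih p.2.2.1 [p] (g + 1)
        simp only [List.map_singleton, List.singleton_append] at this
        rw [← this]
      · simp only [hp, if_false]
        rw [← ih m (cur ++ [p]) g]
        simp

theorem tag_fst_ge (gs : List (List PV)) : ∀ (g : Int) (x : Int × PV), x ∈ tag g gs → g ≤ x.1 := by
  induction gs with
  | nil => simp [tag]
  | cons h t ih =>
      intro g x hx
      simp only [tag, List.mem_append, List.mem_map] at hx
      rcases hx with ⟨p, _, rfl⟩ | hx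
      · simp
      · have := ih (g + 1) x hx
        omega

-- sorting the tagged list on (gid, key) sorts each group on key, keeping group order
theorem sortBy_tag (gs : List (List PV)) : ∀ (g : Int),
    sortBy (fun (a b : Int × PV) =>
        decide (a.1 < b.1) || (!decide (b.1 < a.1) && decide (a.2.2.2.2 < b.2.2.2.2))) (tag g gs)
      = tag g (gs.map (fun h => PySem.List.sorted h (fun p => p.2.2.2) false)) := by
  induction gs with
  | nil => simp [tag, sortBy]
  | cons h t ih =>
      intro g
      simp only [tag, List.map_cons]
      rw [sortBy_append_sep _ _ _ (by
        intro x hx y hy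
        have hx1 : g + 1 ≤ x.1 := tag_fst_ge t (g + 1) x hx
        simp only [List.mem_map] at hy
        obtain ⟨p, _, rfl⟩ := hy
        simp only
        have c1 : ¬ (x.1 < g) := by omega
        have c2 : g < x.1 := by omega
        simp [c1, c2])]
      congr 1
      · rw [sortBy_map (fun (a b : PV) => decide (a.2.2.2 < b.2.2.2)) _ (fun p => (g, p))
          (by intro a b; simp)]
        rw [PySem.List.sorted_eq_foldl_insertBy]
        rfl
      · exact ih (g + 1)

theorem tag_map_snd (gs : List (List PV)) : ∀ (g : Int),
    (tag g gs).map (fun t => t.2) = gs.flatten := by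
  induction gs with
  | nil => simp [tag]
  | cons h t ih =>
      intro g
      simp [tag, ih (g + 1)]

theorem sorted2_eq_sortBy {α : Type} (xs : List (Int × α)) (k2 : Int × α → Int) :
    PySem.List.sorted2 xs (fun t => t.1) k2 false
      = sortBy (fun a b => decide (a.1 < b.1) || (!decide (b.1 < a.1) && decide (k2 a < k2 b))) xs := rfl

-- each side's final list is the flatten of the per-group sorts
theorem portA_list (players : List PV) : find_winnings players =
    (PySem.List.enumerate (sortedGrp players) 1).foldl (fun r ip => r + ip.1 * ip.2.2.1) 0 := by
  unfold find_winnings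
  -- the first loop: index form → enumerate form → (fm, [0] ++ bnd)
  have h1 : (PySem.List.pyRange 0 (PySem.List.len players) 1).foldl
      (fun (s : Int × List Int) i =>
        let p := PySem.List.pyGetD players i ((0 : Int), (0 : Int), (0 : Int), (0 : Int))
        if p.2.2.1 > s.1 then (p.2.2.1, s.2 ++ [i]) else s)
      ((1 : Int), ([0] : List Int))
      = (fm 1 players, [0] ++ bnd 1 0 players) := by
    rw [← loopA_eq players 1 [0] 0]
    rw [PySem.List.enumerate_eq_map_pyRange players ((0 : Int), (0 : Int), (0 : Int), (0 : Int))]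
    rw [List.foldl_map]
  rw [h1]
  -- the ranges list is the scanl of the group lengths
  have h2 : ([(0 : Int)] ++ bnd 1 0 players) ++ [PySem.List.len players]
      = List.scanl (· + ·) ((0 : Int))
          ((grpRec 1 [] players).map (fun g => (g.length : Int))) := by
    have h0 := scanl_grp players 1 [] 0
    norm_num at h0
    rw [h0]
    simp [PySem.List.len_eq]
  simp only [h2]
  -- the second loop: index form → adjacent-pair form
  have h4 : ∀ (R : List Int) (init : List PV),
      (PySem.List.pyRange 0 ((R.length : Int) - 1) 1).foldl
        (fun ps i =>
          let a := PySem.List.pyGetD R i 0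
          let b := PySem.List.pyGetD R (i + 1) 0
          PySem.List.slice ps none (some a)
            ++ PySem.List.sorted (PySem.List.slice ps (some a) (some b)) (fun p => p.2.2.2) false
            ++ PySem.List.slice ps (some b) none)
        init
      = (R.zip R.tail).foldl
        (fun ps ab =>
          PySem.List.slice ps none (some ab.1)
            ++ PySem.List.sorted (PySem.List.slice ps (some ab.1) (some ab.2)) (fun p => p.2.2.2) false
            ++ PySem.List.slice ps (some ab.2) none)
        init := by
    intro R init
    rw [← pairs_map R, List.foldl_map]
  rw [h4]
  -- per-group slice sorting over the scanl boundaries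
  have h3 := slice_fold (grpRec 1 [] players) []
  rw [grpRec_flatten players 1 []] at h3
  simp only [List.nil_append, List.length_nil, Nat.cast_zero] at h3
  rw [h3]
  rfl

theorem portB_list (players : List PV) : find_winnings_alt players =
    (PySem.List.enumerate (sortedGrp players) 1).foldl (fun r ip => r + ip.1 * ip.2.2.1) 0 := by
  unfold find_winnings_alt
  rw [loopB_eq players 0 1 []]
  have hann : annotate 0 1 players = tag 0 (grpRec 1 [] players) := by
    simpa using annotate_tag players 1 [] 0
  simp only [List.nil_append, hann, sorted2_eq_sortBy, sortBy_tag, tag_map_snd]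
  rfl

-- ===== VERDICT (by name: the statement is the Claim_ definition above) =====
theorem find_winnings_spec : Claim_equal_find_winnings := by
  intro players _
  unfold Spec_find_winnings
  rw [portA_list, portB_list]
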